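-- pv_equiv track=rewrite | github.com/YinuoQ/AINegativelyImpactsTeamPerformance | compare_controller_action.py | get_number_of_action
-- ===== SOURCE A (Python) =====
-- def get_number_of_action(input_arr):
--     """
--     Count the number of continuous chunks of non-zero values in an array.
--
--     This function identifies sequences of consecutive non-zero values and counts
--     how many such sequences exist. This is useful for analyzing controller input
--     patterns where continuous actions represent deliberate control inputs.
--
--     Parameters:
--         input_arr (array-like): Array of numerical values representing actions
--
--     Returns:
--         int: Number of continuous chunks of non-zero numbers
--
--     Example:
--         [0, 1, 1, 0, 2, 0, 3, 3, 3] -> 3 chunks: [1,1], [2], [3,3,3]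
--     """
--     continuous_chunks = 0
--     in_chunk = False
--
--     # Handle special case where input_arr is nested (length 2 with first element being the actual array)
--     if len(input_arr) == 2:
--         input_arr = input_arr[0]
--
--     # Iterate through the array to identify and count continuous non-zero chunks
--     for value in input_arr:
--         # Start of a new chunk: non-zero value when not already in a chunk
--         if value != 0 and not in_chunk:
--             continuous_chunks += 1
--             in_chunk = True
--         # End of current chunk: zero value resets the chunk state
--         elif value == 0:
--             in_chunk = False
--
--     return continuous_chunks
-- ===== SOURCE B (Python) =====
-- def get_number_of_action(input_arr):
--     # Stage 1: split the array into segments at each zero (zeros are separators).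
--     segments = []
--     current = []
--     for x in input_arr:
--         if x == 0:
--             segments.append(current)
--             current = []
--         else:
--             current.append(x)
--     segments.append(current)
--     # Stage 2: each non-empty segment is one continuous non-zero chunk.
--     return sum(1 for seg in segments if seg)
-- ===== Notes on version B (the rewrite author's own statement) =====
-- stated objective: alternative
-- what changed: B replaces A's in_chunk state-machine counter by two stages: it first splits the array at zeros into a list of segments, then counts the non-empty segments; A's len==2 unwrapping (which on an int list raises TypeError) is excluded by Pre_.
import Mathlib
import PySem

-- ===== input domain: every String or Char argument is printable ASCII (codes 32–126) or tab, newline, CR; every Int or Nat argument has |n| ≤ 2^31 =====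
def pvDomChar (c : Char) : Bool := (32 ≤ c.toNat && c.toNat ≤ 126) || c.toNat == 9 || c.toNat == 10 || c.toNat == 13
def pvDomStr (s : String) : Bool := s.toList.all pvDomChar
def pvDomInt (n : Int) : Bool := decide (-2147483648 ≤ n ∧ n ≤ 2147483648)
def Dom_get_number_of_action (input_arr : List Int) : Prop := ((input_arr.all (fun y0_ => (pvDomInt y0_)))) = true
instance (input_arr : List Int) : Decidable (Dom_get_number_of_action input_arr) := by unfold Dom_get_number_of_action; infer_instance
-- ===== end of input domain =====

-- B splits the array at zeros into segments and counts the non-empty segments,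
-- instead of A's in_chunk state machine; return-value equivalence on lists of
-- length ≠ 2 (on length 2 the Python A raises TypeError).

-- ===== PORT A =====
-- A's for-loop over (continuous_chunks, in_chunk); branches in A's order.
def pvLoopA : List Int → Int → Bool → Int
  | [], c, _ => c
  | v :: t, c, b =>
    if v ≠ 0 ∧ b = false then pvLoopA t (c + 1) true
    else if v = 0 then pvLoopA t c false
    else pvLoopA t c b

def get_number_of_action (input_arr : List Int) : Int :=
  -- On length-2 lists Python A unwraps input_arr[0] (an int) and raises TypeError
  -- when iterating it; those inputs are outside Pre_, the port returns 0 there.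
  if input_arr.length = 2 then 0
  else pvLoopA input_arr 0 false

-- ===== PORT B =====
-- Stage 1 step: zeros close the current segment, other values extend it.
def pvSegStep (st : List (List Int) × List Int) (x : Int) : List (List Int) × List Int :=
  if x = 0 then (st.1 ++ [st.2], []) else (st.1, st.2 ++ [x])

def get_number_of_action_alt (input_arr : List Int) : Int :=
  let st := input_arr.foldl pvSegStep ([], [])
  let segments := st.1 ++ [st.2]
  ((segments.countP (fun seg => seg ≠ [])) : Nat)

-- ===== PRECONDITION & SPEC =====
-- Pre_ excludes lists of length exactly 2, on which Python A raises TypeError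
-- (the len==2 "nested input" unwrap yields an int, which is not iterable).
def Pre_get_number_of_action (input_arr : List Int) : Prop := input_arr.length ≠ 2
instance (input_arr : List Int) : Decidable (Pre_get_number_of_action input_arr) := by
  unfold Pre_get_number_of_action; infer_instance

def pvWitness_get_number_of_action : List Int := [0, 1, 1, 0, 2]

def Spec_get_number_of_action (input_arr : List Int) (out : Int) : Prop := out = get_number_of_action_alt input_arr
instance (input_arr : List Int) (out : Int) : Decidable (Spec_get_number_of_action input_arr out) := by unfold Spec_get_number_of_action; infer_instance

-- ===== CLAIM (what is proved, stated in full; the proofs are below) =====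
def Claim_equal_get_number_of_action : Prop := ∀ (input_arr : List Int), Dom_get_number_of_action input_arr → Pre_get_number_of_action input_arr → Spec_get_number_of_action input_arr (get_number_of_action input_arr)
-- ===== LEMMAS AND PROOFS =====

-- B's count as a function of the fold state: non-empty finished segments plus
-- one for a non-empty current segment.
def pvN (st : List (List Int) × List Int) : Int :=
  (st.1.countP (fun seg => seg ≠ []) : Nat) + (if st.2 ≠ [] then 1 else 0)

theorem pvN_close (segs : List (List Int)) (cur : List Int) :
    pvN (segs ++ [cur], []) = pvN (segs, cur) := by
  by_cases h : cur = [] <;>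
    simp [pvN, List.countP_append, h]

-- Invariant: A's state machine started at counter c + pvN st, with in_chunk
-- tracking "current segment non-empty", ends at c + pvN (final fold state).
theorem pvLoopA_eq_fold (xs : List Int) : ∀ (segs : List (List Int)) (cur : List Int) (c : Int),
    pvLoopA xs (c + pvN (segs, cur)) (decide (cur ≠ [])) =
      c + pvN (xs.foldl pvSegStep (segs, cur)) := by
  induction xs with
  | nil => intro segs cur c; simp [pvLoopA]
  | cons x t ih =>
    intro segs cur c
    by_cases hx : x = 0
    · have := ih (segs ++ [cur]) [] c
      simp [pvLoopA, hx, pvSegStep, pvN_close] at this ⊢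
      simpa [pvN_close] using this
    · by_cases hc : cur = []
      · have := ih segs [x] c
        have hN : pvN (segs, ([x] : List Int)) = pvN (segs, ([] : List Int)) + 1 := by
          simp [pvN]
        simp [pvLoopA, hx, hc, pvSegStep, hN] at this ⊢
        rw [show c + (pvN (segs, ([] : List Int)) + 1) = c + pvN (segs, ([] : List Int)) + 1 by ring] at this
        simpa using this
      · have := ih segs (cur ++ [x]) c
        have hN : pvN (segs, cur ++ [x]) = pvN (segs, cur) := by
          simp [pvN, hc]
        simp [pvLoopA, hx, hc, pvSegStep, hN] at this ⊢
        simpa [hN] using this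

-- ===== VERDICT (by name: the statement is the Claim_ definition above) =====
theorem get_number_of_action_spec : Claim_equal_get_number_of_action := by
  intro xs _ hpre
  unfold Spec_get_number_of_action get_number_of_action get_number_of_action_alt
  rw [if_neg hpre]
  have h := pvLoopA_eq_fold xs [] [] 0
  simp [pvN] at h
  rw [h]
  by_cases hc : (xs.foldl pvSegStep ([], [])).2 = [] <;>
    simp [hc, List.countP_append]
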